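-- pv_equiv track=rewrite | github.com/Creamery/OOTO-Miner-V5 | __Filter_support.py | purgedCross
-- ===== SOURCE A (Python) =====
-- def purgedCross(cross):
--     isPurged = False
--     # st = st[:-1]
--     for filter_element in cross:
--         # Remove last letter of each entry inside filter_element (i.e. 'a' and 'b')
--         clean_filter_element = [x[:-1] for x in filter_element]
--
--         # Statement returns true of there is a duplicate in clean_filter_element
--         if len(clean_filter_element) != len(set(clean_filter_element)):
--             # if duplicate exists, set isPurged to True and return
--             isPurged = True
--             return isPurged
--     return isPurged
-- ===== SOURCE B (Python) =====
-- def purgedCross(cross):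
--     for filter_element in cross:
--         prefixes = sorted(x[:-1] for x in filter_element)
--         if any(a == b for a, b in zip(prefixes, prefixes[1:])):
--             return True
--     return False
-- ===== Notes on version B (the rewrite author's own statement) =====
-- stated objective: alternative
-- what changed: Duplicate detection per sublist is done by sorting the cleaned prefixes and scanning adjacent pairs for an equal neighbour, instead of comparing the list's length with the length of its set.
import Mathlib
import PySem

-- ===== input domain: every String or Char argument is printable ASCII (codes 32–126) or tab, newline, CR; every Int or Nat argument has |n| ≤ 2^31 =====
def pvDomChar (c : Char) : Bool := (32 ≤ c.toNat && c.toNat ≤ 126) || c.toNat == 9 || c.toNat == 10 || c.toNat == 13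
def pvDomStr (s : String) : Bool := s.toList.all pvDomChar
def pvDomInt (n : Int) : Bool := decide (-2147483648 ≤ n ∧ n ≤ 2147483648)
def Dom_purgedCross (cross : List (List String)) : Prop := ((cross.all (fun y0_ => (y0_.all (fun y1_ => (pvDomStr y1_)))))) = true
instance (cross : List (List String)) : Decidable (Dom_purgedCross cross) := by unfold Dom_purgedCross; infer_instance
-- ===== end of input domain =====

-- B detects a per-sublist duplicate by sorting the cleaned prefixes and scanning adjacent
-- pairs, instead of A's set/length comparison; same result, alternative algorithm.

-- ===== PORT A =====
def purgedCross : List (List String) → Bool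
  | [] => false
  | filter_element :: rest =>
    -- clean_filter_element = [x[:-1] for x in filter_element]
    let clean_filter_element := filter_element.map (fun x => PySem.Str.slice x none (some (-1)))
    if clean_filter_element.length ≠ (PySem.Set.ofList clean_filter_element).length then
      true   -- isPurged = True; return isPurged
    else
      purgedCross rest

-- ===== PORT B =====
-- any(a == b for a, b in zip(prefixes, prefixes[1:]))
def pvAdjEq (prefixes : List String) : Bool :=
  (prefixes.zip (PySem.List.slice prefixes (some 1) none)).any (fun p => p.1 == p.2)

def purgedCross_alt : List (List String) → Bool
  | [] => false
  | filter_element :: rest =>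
    let prefixes := PySem.List.sorted (filter_element.map (fun x => PySem.Str.slice x none (some (-1)))) (fun x => x) false
    if pvAdjEq prefixes then true else purgedCross_alt rest

-- ===== PRECONDITION & SPEC =====
def Spec_purgedCross (cross : List (List String)) (out : Bool) : Prop := out = purgedCross_alt cross
instance (cross : List (List String)) (out : Bool) : Decidable (Spec_purgedCross cross out) := by unfold Spec_purgedCross; infer_instance

-- ===== CLAIM (what is proved, stated in full; the proofs are below) =====
def Claim_equal_purgedCross : Prop := ∀ (cross : List (List String)), Dom_purgedCross cross → Spec_purgedCross cross (purgedCross cross)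

-- ===== LEMMAS AND PROOFS =====

-- A sorted list with no equal adjacent pair has no duplicates at all.
theorem pvAdjEq_false_nodup (l : List String) (hs : l.Pairwise (· ≤ ·))
    (h : pvAdjEq l = false) : l.Nodup := by
  induction l with
  | nil => simp
  | cons a t ih =>
    cases t with
    | nil => simp
    | cons b t' =>
      rw [pvAdjEq, PySem.List.slice_from_one] at h
      simp only [List.tail_cons, List.zip_cons_cons, List.any_cons, Bool.or_eq_false_iff,
        beq_eq_false_iff_ne] at h
      obtain ⟨hab, hrest⟩ := h
      have hs' := List.pairwise_cons.mp hs
      have ht : (b :: t').Nodup := by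
        apply ih hs'.2
        rw [pvAdjEq, PySem.List.slice_from_one]
        simpa using hrest
      refine List.nodup_cons.mpr ⟨?_, ht⟩
      intro hmem
      have hab_lt : a < b := lt_of_le_of_ne (hs'.1 b (by simp)) hab
      rcases List.mem_cons.mp hmem with h1 | h1
      · exact hab (by simp [h1])
      · have hbx : b ≤ a := (List.pairwise_cons.mp hs'.2).1 a h1
        exact absurd (lt_of_lt_of_le hab_lt hbx) (lt_irrefl a)

-- An equal adjacent pair is a duplicate.
theorem pvAdjEq_true_not_nodup (l : List String) (h : pvAdjEq l = true) : ¬ l.Nodup := by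
  induction l with
  | nil => simp [pvAdjEq] at h
  | cons a t ih =>
    cases t with
    | nil => simp [pvAdjEq, PySem.List.slice_from_one] at h
    | cons b t' =>
      rw [pvAdjEq, PySem.List.slice_from_one] at h
      simp only [List.tail_cons, List.zip_cons_cons, List.any_cons, Bool.or_eq_true] at h
      intro hnd
      rcases h with h1 | h1
      · have : a = b := by simpa using h1
        exact (List.nodup_cons.mp hnd).1 (by simp [this])
      · apply ih ?_ (List.nodup_cons.mp hnd).2
        rw [pvAdjEq, PySem.List.slice_from_one]
        simpa using h1

theorem pvAdjEq_sorted_iff (xs : List String) :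
    pvAdjEq (PySem.List.sorted xs (fun x => x) false) = true ↔ ¬ xs.Nodup := by
  constructor
  · intro h hnd
    exact pvAdjEq_true_not_nodup _ h
      ((PySem.List.sorted_perm xs (fun x => x) false).nodup_iff.mpr hnd)
  · intro h
    by_contra hb
    have hnd := pvAdjEq_false_nodup _ (by simpa using PySem.List.sorted_pairwise xs (fun x => x))
      (Bool.not_eq_true _ ▸ hb)
    exact h ((PySem.List.sorted_perm xs (fun x => x) false).nodup_iff.mp hnd)

theorem pvOfList_length (xs : List String) : (PySem.Set.ofList xs).length = xs.toFinset.card := by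
  have hfin : (PySem.Set.ofList xs).toFinset = xs.toFinset := by
    ext y; simp [List.mem_toFinset, PySem.Set.mem_ofList]
  rw [← hfin, List.toFinset_card_of_nodup (PySem.Set.nodup_ofList xs)]

theorem pvLenSet_iff (xs : List String) :
    xs.length ≠ (PySem.Set.ofList xs).length ↔ ¬ xs.Nodup := by
  rw [pvOfList_length, not_iff_not]
  have hiff : xs.toFinset.card = xs.length ↔ xs.Nodup := by
    simpa using Multiset.toFinset_card_eq_card_iff_nodup (m := (xs : Multiset String))
  exact ⟨fun h => hiff.mp h.symm, fun h => (hiff.mpr h).symm⟩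

theorem pvEq (cross : List (List String)) : purgedCross cross = purgedCross_alt cross := by
  induction cross with
  | nil => rfl
  | cons fe rest ih =>
    rw [purgedCross, purgedCross_alt]
    set clean := fe.map (fun x => PySem.Str.slice x none (some (-1))) with hc
    have hcond : (decide (clean.length ≠ (PySem.Set.ofList clean).length))
        = pvAdjEq (PySem.List.sorted clean (fun x => x) false) := by
      by_cases hnd : clean.Nodup
      · have h1 : ¬ clean.length ≠ (PySem.Set.ofList clean).length := by
          rw [pvLenSet_iff]; exact not_not_intro hnd
        have h2 : pvAdjEq (PySem.List.sorted clean (fun x => x) false) ≠ true := by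
          intro h; exact (pvAdjEq_sorted_iff clean).mp h hnd
        simp [h1, h2]
      · have h1 : clean.length ≠ (PySem.Set.ofList clean).length := (pvLenSet_iff clean).mpr hnd
        have h2 : pvAdjEq (PySem.List.sorted clean (fun x => x) false) = true :=
          (pvAdjEq_sorted_iff clean).mpr hnd
        simp [h1, h2]
    by_cases h : clean.length ≠ (PySem.Set.ofList clean).length
    · have : pvAdjEq (PySem.List.sorted clean (fun x => x) false) = true := by
        rw [← hcond]; simpa using h
      simp [h, this]
    · have : pvAdjEq (PySem.List.sorted clean (fun x => x) false) = false := by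
        rw [← hcond]; simpa using h
      simp [h, this]
      exact ih

-- ===== VERDICT (by name: the statement is the Claim_ definition above) =====
theorem purgedCross_spec : Claim_equal_purgedCross :=
  fun cross _ => pvEq cross
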